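-- pv_equiv track=rewrite | github.com/Supaero-Computer-Science-Club/Mastermind | src/computer.py | code2index
-- ===== SOURCE A (Python) =====
-- def code2index(code, colors):
--     b = len(code)
--     exp = 1
--     s = 0
--     for i in range(b):
--         s += code[b - i - 1]*exp
--         exp *= colors
--
--     return s
-- ===== SOURCE B (Python) =====
-- def code2index(code, colors):
--     s = 0
--     for d in code:
--         s = s * colors + d
--     return s
-- ===== Notes on version B (the rewrite author's own statement) =====
-- stated objective: simpler
-- what changed: Horner's method: one forward pass with a single multiply-accumulate, eliminating A's reverse indexing and its explicit power accumulator.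
import Mathlib
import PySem

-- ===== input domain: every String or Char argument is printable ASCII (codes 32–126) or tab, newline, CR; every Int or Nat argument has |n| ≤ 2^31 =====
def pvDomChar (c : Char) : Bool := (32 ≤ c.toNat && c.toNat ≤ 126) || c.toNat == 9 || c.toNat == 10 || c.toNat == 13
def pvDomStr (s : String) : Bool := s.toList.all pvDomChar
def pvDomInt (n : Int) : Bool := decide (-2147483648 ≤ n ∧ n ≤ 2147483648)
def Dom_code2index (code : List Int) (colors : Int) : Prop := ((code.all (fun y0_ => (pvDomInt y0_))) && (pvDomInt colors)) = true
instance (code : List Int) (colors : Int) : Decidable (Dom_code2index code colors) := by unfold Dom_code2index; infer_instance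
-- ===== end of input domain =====

-- B replaces A's least-significant-first loop with an explicit power accumulator by
-- a forward Horner pass (s = s*colors + d), for simplicity; same O(n) cost, no mutation.

-- ===== PORT A =====
-- literal port: b = len(code); state (s, exp) starting (0, 1); loop i in range(b):
-- s += code[b-i-1]*exp; exp *= colors
def code2index (code : List Int) (colors : Int) : Int :=
  let b : Int := (code.length : Int)
  ((PySem.List.pyRange 0 b 1).foldl
    (fun (se : Int × Int) i => (se.1 + (PySem.List.pyGetD code (b - i - 1) 0) * se.2, se.2 * colors))
    (0, 1)).1

-- ===== PORT B =====
-- Horner: forward pass, s = s*colors + d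
def code2index_alt (code : List Int) (colors : Int) : Int :=
  code.foldl (fun s d => s * colors + d) 0

-- ===== PRECONDITION & SPEC =====
def Spec_code2index (code : List Int) (colors : Int) (out : Int) : Prop := out = code2index_alt code colors
instance (code : List Int) (colors : Int) (out : Int) : Decidable (Spec_code2index code colors out) := by unfold Spec_code2index; infer_instance

-- ===== CLAIM (what is proved, stated in full; the proofs are below) =====
def Claim_equal_code2index : Prop := ∀ (code : List Int) (colors : Int), Dom_code2index code colors → Spec_code2index code colors (code2index code colors)

-- ===== LEMMAS AND PROOFS =====

-- Horner with an arbitrary seed splits off the seed times colors^length.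
theorem horner_shift (colors : Int) (t : List Int) : ∀ (a : Int),
    t.foldl (fun s d => s * colors + d) a
      = a * colors ^ t.length + t.foldl (fun s d => s * colors + d) 0 := by
  induction t with
  | nil => intro a; simp
  | cons d t ih =>
      intro a
      simp only [List.foldl_cons, List.length_cons, ih (a * colors + d), ih (0 * colors + d)]
      ring

-- A's reverse-order power-accumulating fold computes (Horner value, colors^length).
theorem rev_fold_horner (colors : Int) (xs : List Int) :
    xs.reverse.foldl
        (fun (se : Int × Int) d => (se.1 + d * se.2, se.2 * colors)) (0, 1)
      = (xs.foldl (fun s d => s * colors + d) 0, colors ^ xs.length) := by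
  induction xs with
  | nil => simp
  | cons x t ih =>
      have hfst : (x :: t).foldl (fun s d => s * colors + d) 0
          = x * colors ^ t.length + t.foldl (fun s d => s * colors + d) 0 := by
        rw [List.foldl_cons, horner_shift]; ring
      rw [List.reverse_cons, List.foldl_append, ih, List.foldl_cons, List.foldl_nil, hfst,
        List.length_cons]
      refine Prod.ext ?_ ?_
      · show t.foldl (fun s d => s * colors + d) 0 + x * colors ^ t.length
            = x * colors ^ t.length + t.foldl (fun s d => s * colors + d) 0
        ring
      · show colors ^ t.length * colors = colors ^ (t.length + 1)
        rw [pow_succ]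

theorem code2index_spec' (code : List Int) (colors : Int) :
    code2index code colors = code2index_alt code colors := by
  show ((PySem.List.pyRange 0 (code.length : Int) 1).foldl
      (fun (se : Int × Int) i =>
        (se.1 + (PySem.List.pyGetD code ((code.length : Int) - i - 1) 0) * se.2, se.2 * colors))
      (0, 1)).1
    = code.foldl (fun s d => s * colors + d) 0
  have hcongr :
      (PySem.List.pyRange 0 (code.length : Int) 1).foldl
        (fun (se : Int × Int) i =>
          (se.1 + (PySem.List.pyGetD code ((code.length : Int) - i - 1) 0) * se.2, se.2 * colors))
        (0, 1)
      = (PySem.List.pyRange 0 (code.length : Int) 1).foldl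
        (fun (se : Int × Int) i =>
          (se.1 + (PySem.List.pyGetD code.reverse i 0) * se.2, se.2 * colors))
        (0, 1) := by
    apply PySem.List.foldl_congr_mem
    intro acc x hx
    rw [PySem.List.mem_pyRange_one] at hx
    have h1 : PySem.List.pyGetD code ((code.length : Int) - x - 1) 0
        = code[((code.length : Int) - x - 1).toNat]'(by omega) := by
      apply PySem.List.pyGetD_eq_getElem <;> omega
    have h2 : PySem.List.pyGetD code.reverse x 0
        = code.reverse[x.toNat]'(by rw [List.length_reverse]; omega) := by
      apply PySem.List.pyGetD_eq_getElem
      · omega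
      · rw [List.length_reverse]; omega
    rw [h1, h2, List.getElem_reverse]
    have hidx : ((code.length : Int) - x - 1).toNat = code.length - 1 - x.toNat := by omega
    simp_rw [hidx]
  rw [hcongr, show ((code.length : Int)) = (code.reverse.length : Int) from by simp,
    PySem.List.foldl_pyRange_zero_pyGetD' code.reverse 0
      (fun (se : Int × Int) d => (se.1 + d * se.2, se.2 * colors)) (0, 1),
    rev_fold_horner]

-- ===== VERDICT (by name: the statement is the Claim_ definition above) =====
theorem code2index_spec : Claim_equal_code2index := by
  intro code colors _
  exact code2index_spec' code colors
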